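-- pv_equiv track=rewrite | github.com/AcornGenetics/aquilla-main | aq_curve/evaluator.py | _group_true_indices
-- ===== SOURCE A (Python) =====
-- def _group_true_indices(mask):
--     groups = []
--     start = None
--     for idx, value in enumerate(mask):
--         if value and start is None:
--             start = idx
--         elif not value and start is not None:
--             groups.append((start, idx - 1))
--             start = None
--     if start is not None:
--         groups.append((start, len(mask) - 1))
--     return groups
-- ===== SOURCE B (Python) =====
-- def _group_true_indices(mask):
--     # Run-length scan: split the mask into maximal runs of equal truthiness
--     # and emit one (start, end) span per True run.
--     groups = []
--     i, n = 0, len(mask)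
--     while i < n:
--         j = i
--         while j < n and bool(mask[j]) == bool(mask[i]):
--             j += 1
--         if mask[i]:
--             groups.append((i, j - 1))
--         i = j
--     return groups
-- ===== Notes on version B (the rewrite author's own statement) =====
-- stated objective: alternative
-- what changed: Replaced the single stateful pass tracking a nullable run-start with a run-length scan that finds each maximal run of equal truthiness with an inner cursor and emits a span per True run.
import Mathlib
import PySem

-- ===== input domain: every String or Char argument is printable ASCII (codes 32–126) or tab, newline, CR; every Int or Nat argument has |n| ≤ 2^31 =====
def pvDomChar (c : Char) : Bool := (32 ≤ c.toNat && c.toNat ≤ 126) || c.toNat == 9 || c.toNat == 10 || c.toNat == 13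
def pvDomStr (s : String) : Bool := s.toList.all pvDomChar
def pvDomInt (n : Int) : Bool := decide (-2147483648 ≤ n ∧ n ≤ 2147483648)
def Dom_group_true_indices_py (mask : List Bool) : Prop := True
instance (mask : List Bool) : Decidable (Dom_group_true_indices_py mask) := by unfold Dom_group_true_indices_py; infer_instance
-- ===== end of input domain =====

-- B replaces A's stateful nullable-start pass by a run-length scan over maximal
-- runs of equal value (objective: alternative; same cost).

-- ===== PORT A =====
-- loop body of A: state = (groups, start); start = none ↔ Python's start is None
def pvStepA (st : List (Int × Int) × Option Int) (p : Int × Bool) : List (Int × Int) × Option Int :=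
  match st.2 with
  | none => if p.2 then (st.1, some p.1) else st
  | some s => if p.2 then st else (st.1 ++ [(s, p.1 - 1)], none)

def group_true_indices_py (mask : List Bool) : List (Int × Int) :=
  let st := (PySem.List.enumerate mask).foldl pvStepA ([], none)
  match st.2 with
  | none => st.1
  | some s => st.1 ++ [(s, (mask.length : Int) - 1)]

-- ===== PORT B =====
-- B's outer while loop: at cursor i, the inner while finds the end of the
-- maximal run of values equal to mask[i] (takeWhile/dropWhile = that scan).
def pvGoB (i : Int) (l : List Bool) : List (Int × Int) :=
  match l with
  | [] => []
  | x :: xs =>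
    let run := xs.takeWhile (· == x)
    let rest := xs.dropWhile (· == x)
    let n : Int := 1 + run.length
    (if x then [(i, i + n - 1)] else []) ++ pvGoB (i + n) rest
termination_by l.length
decreasing_by
  simp only [List.length_cons]
  exact Nat.lt_succ_of_le (List.length_dropWhile_le _ _)

def group_true_indices_py_alt (mask : List Bool) : List (Int × Int) := pvGoB 0 mask

-- ===== PRECONDITION & SPEC =====
def Spec_group_true_indices_py (mask : List Bool) (out : List (Int × Int)) : Prop := out = group_true_indices_py_alt mask
instance (mask : List Bool) (out : List (Int × Int)) : Decidable (Spec_group_true_indices_py mask out) := by unfold Spec_group_true_indices_py; infer_instance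

-- ===== CLAIM (what is proved, stated in full; the proofs are below) =====
def Claim_equal_group_true_indices_py : Prop := ∀ (mask : List Bool), Dom_group_true_indices_py mask → Spec_group_true_indices_py mask (group_true_indices_py mask)

-- ===== LEMMAS AND PROOFS =====

-- finalisation of A's state
def pvFin (e : Int) (st : List (Int × Int) × Option Int) : List (Int × Int) :=
  match st.2 with
  | none => st.1
  | some s => st.1 ++ [(s, e - 1)]

lemma pvSkipFalse (l : List Bool) (hl : ∀ b ∈ l, b = false) :
    ∀ (s : Int) (acc : List (Int × Int)),
      (PySem.List.enumerate l s).foldl pvStepA (acc, none) = (acc, none) := by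
  induction l with
  | nil => intro s acc; simp [PySem.List.enumerate_nil]
  | cons x xs ih =>
    intro s acc
    have hx : x = false := hl x (by simp)
    simp [PySem.List.enumerate_cons, hx, pvStepA,
      ih (fun b hb => hl b (by simp [hb]))]

lemma pvSkipTrue (l : List Bool) (hl : ∀ b ∈ l, b = true) :
    ∀ (s st : Int) (acc : List (Int × Int)),
      (PySem.List.enumerate l s).foldl pvStepA (acc, some st) = (acc, some st) := by
  induction l with
  | nil => intro s st acc; simp [PySem.List.enumerate_nil]
  | cons x xs ih =>
    intro s st acc
    have hx : x = true := hl x (by simp)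
    simp [PySem.List.enumerate_cons, hx, pvStepA,
      ih (fun b hb => hl b (by simp [hb]))]

lemma pvDropWhileHead {p : Bool → Bool} {xs : List Bool} {y : Bool} {r : List Bool}
    (h : xs.dropWhile p = y :: r) : p y = false := by
  induction xs with
  | nil => simp [List.dropWhile] at h
  | cons a t ih =>
    by_cases hp : p a
    · exact ih (by simpa [List.dropWhile, hp] using h)
    · rw [List.dropWhile_cons_of_neg hp] at h
      cases h; simpa using hp

lemma pvMain : ∀ (n : Nat) (l : List Bool), l.length ≤ n →
    ∀ (s : Int) (acc : List (Int × Int)),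
      pvFin (s + l.length) ((PySem.List.enumerate l s).foldl pvStepA (acc, none))
        = acc ++ pvGoB s l := by
  intro n
  induction n with
  | zero =>
    intro l h s acc
    have : l = [] := List.eq_nil_of_length_eq_zero (Nat.le_zero.mp h)
    subst this
    simp [PySem.List.enumerate_nil, pvFin, pvGoB]
  | succ n ih =>
    intro l h s acc
    match l with
    | [] => simp [PySem.List.enumerate_nil, pvFin, pvGoB]
    | x :: xs =>
      have hsplit : xs.takeWhile (· == x) ++ xs.dropWhile (· == x) = xs :=
        List.takeWhile_append_dropWhile
      set run := xs.takeWhile (· == x) with hrun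
      set rest := xs.dropWhile (· == x) with hrest
      have hlen : xs.length = run.length + rest.length := by
        rw [← hsplit]; simp
      have hrunmem : ∀ b ∈ run, b = x := by
        intro b hb
        have := List.mem_takeWhile_imp hb
        simpa using this
      rw [pvGoB]
      cases x with
      | false =>
        -- A skips the false run, then recurse on rest
        have hxs : PySem.List.enumerate xs (s + 1)
            = PySem.List.enumerate run (s + 1)
              ++ PySem.List.enumerate rest (s + 1 + run.length) := by
          conv_lhs => rw [← hsplit]
          rw [PySem.List.enumerate_append]
        simp only [PySem.List.enumerate_cons, List.foldl_cons, pvStepA, Bool.false_eq_true, if_false, if_true]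
        rw [hxs, List.foldl_append, pvSkipFalse run hrunmem]
        have hrl : rest.length ≤ n := by
          have : xs.length ≤ n := by simpa using h
          omega
        have harith : s + (((false :: xs).length : Nat) : Int)
            = (s + 1 + run.length) + rest.length := by
          simp only [List.length_cons]; push_cast [hlen]; ring
        rw [harith, ih rest hrl (s + 1 + run.length) acc]
        have h2 : s + 1 + (run.length : Int) = s + (1 + run.length) := by ring
        rw [h2]
        simp only [← hrun, ← hrest]
        try simp
        try rfl
      | true =>
        -- A enters the run at s, skips the true run
        have hxs : PySem.List.enumerate xs (s + 1)
            = PySem.List.enumerate run (s + 1)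
              ++ PySem.List.enumerate rest (s + 1 + run.length) := by
          conv_lhs => rw [← hsplit]
          rw [PySem.List.enumerate_append]
        simp only [PySem.List.enumerate_cons, List.foldl_cons, pvStepA, Bool.false_eq_true, if_false, if_true]
        rw [hxs, List.foldl_append, pvSkipTrue run hrunmem]
        cases hr : rest with
        | nil =>
          simp only [hr] at *
          simp only [PySem.List.enumerate_nil, List.foldl_nil, pvFin, pvGoB]
          have hxr : xs.length = run.length := by simpa using hlen
          have harith : s + (((true :: xs).length : Nat) : Int) - 1
              = s + (1 + (run.length : Int)) - 1 := by
            simp only [List.length_cons]; push_cast [hxr]; ring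
          simp only [← hrun, ← hrest]
          try simp [harith, pvGoB, hxr]
          try omega
        | cons y r =>
          have hy : y = false := by
            have := pvDropWhileHead (p := (· == true)) (xs := xs) (hrest ▸ hr)
            simpa using this
          subst hy
          have hrl : (false :: r).length ≤ n := by
            have hx : xs.length ≤ n := by simpa using h
            have : xs.length = run.length + (1 + r.length) := by
              rw [hlen, hr]; simp only [List.length_cons]; omega
            simp only [List.length_cons]; omega
          have hIH := ih (false :: r) hrl (s + 1 + run.length)
            (acc ++ [(s, s + 1 + (run.length : Int) - 1)])
          simp only [PySem.List.enumerate_cons, List.foldl_cons, pvStepA, Bool.false_eq_true, if_false, if_true] at hIH ⊢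
          have hlen2 : s + ((true :: xs).length : Int)
              = (s + 1 + run.length) + ((false :: r).length : Int) := by
            have : xs.length = run.length + (1 + r.length) := by
              rw [hlen, hr]; simp only [List.length_cons]; omega
            simp only [List.length_cons]; push_cast [this]; ring
          rw [hlen2, hIH]
          have h3 : s + 1 + (run.length : Int) - 1 = s + (1 + run.length) - 1 := by ring
          have h4 : s + 1 + (run.length : Int) = s + (1 + run.length) := by ring
          rw [h3, h4]
          simp only [← hrun, ← hrest, hr]
          try simp
          try rfl

-- ===== VERDICT (by name: the statement is the Claim_ definition above) =====
theorem group_true_indices_py_spec : Claim_equal_group_true_indices_py := by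
  intro mask _
  unfold Spec_group_true_indices_py group_true_indices_py group_true_indices_py_alt
  have := pvMain mask.length mask le_rfl 0 []
  simp only [pvFin, zero_add, List.nil_append] at this
  exact this
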